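-- pv_equiv track=rewrite | github.com/hegyiadam/StreamAnalysisBI | Scraping/scrapers.py | remove_wrong_chars_from_text
-- ===== SOURCE A (Python) =====
-- def remove_wrong_chars_from_text(text):
--     new_text = ''
--     i = 0
--     while i<len(text):
--         ch = ord(text[i])
--         #this only keeps a-z;A-z; ;' characters in the text
--         if ( ((ch>=65) & (ch<=90)) | ((ch>=97)&(ch<=122)) | (ch == 32) | (ch == 39)| (ch == 46)):
--             new_text = new_text + text[i]
--         else:
--             new_text = new_text + ' '
--         i+=1
--     return ' '.join(new_text.split())
-- ===== SOURCE B (Python) =====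
-- def remove_wrong_chars_from_text(text):
--     # One pass: accumulate maximal runs of allowed non-space chars as words,
--     # flushing on any other character; no intermediate full-length string, no split().
--     words = []
--     cur = []
--     for c in text:
--         if c.isalpha() or c == '.' or c == "'":
--             cur.append(c)
--         else:
--             if cur:
--                 words.append(''.join(cur))
--                 cur = []
--     if cur:
--         words.append(''.join(cur))
--     return ' '.join(words)
-- ===== Notes on version B (the rewrite author's own statement) =====
-- stated objective: faster
-- what changed: Instead of building a substituted copy of the whole string by repeated char-by-char string concatenation and then collapsing it with split()/join, B makes a single pass that accumulates maximal runs of allowed non-space characters as words and joins them once.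
import Mathlib
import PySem

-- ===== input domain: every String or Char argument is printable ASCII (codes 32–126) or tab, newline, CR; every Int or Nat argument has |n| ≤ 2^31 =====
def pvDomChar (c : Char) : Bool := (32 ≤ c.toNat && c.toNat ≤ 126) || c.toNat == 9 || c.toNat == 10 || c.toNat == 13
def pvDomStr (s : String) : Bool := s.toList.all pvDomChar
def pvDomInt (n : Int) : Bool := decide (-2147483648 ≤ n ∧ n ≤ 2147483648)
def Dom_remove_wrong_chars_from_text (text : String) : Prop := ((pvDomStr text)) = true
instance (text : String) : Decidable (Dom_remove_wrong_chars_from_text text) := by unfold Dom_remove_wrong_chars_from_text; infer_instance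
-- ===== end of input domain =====

-- B replaces A's index-loop char substitution followed by split()/join with a single
-- word-accumulating pass, avoiding A's repeated string concatenation (measured faster in a timing run).

-- ===== PORT A =====
-- while i < len(text): classify ord(text[i]) and append the char or ' '; then ' '.join(new_text.split())
def remove_wrong_chars_from_text (text : String) : String :=
  let cs := text.toList
  let new_text :=
    (PySem.List.pyRange 0 (PySem.List.len cs) 1).foldl
      (fun (acc : List Char) i =>
        let c := PySem.List.pyGetD cs i ' '
        let ch := c.toNat
        if ((65 ≤ ch && ch ≤ 90) || (97 ≤ ch && ch ≤ 122) || (ch == 32) || (ch == 39) || (ch == 46)) then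
          acc ++ [c]
        else
          acc ++ [' ']) ([] : List Char)
  PySem.Str.join " " (PySem.Str.split₀ (String.ofList new_text))

-- ===== PORT B =====
def pvBKeep (c : Char) : Bool := PySem.Chars.isalpha c || c == '.' || c == '\''

-- one pass: extend the current word on an allowed non-space char, flush it otherwise
def remove_wrong_chars_from_text_alt (text : String) : String :=
  let st := text.toList.foldl
    (fun (p : List (List Char) × List Char) c =>
      if pvBKeep c then (p.1, p.2 ++ [c])
      else if p.2.isEmpty then p else (p.1 ++ [p.2], []))
    (([] : List (List Char)), ([] : List Char))
  let words := if st.2.isEmpty then st.1 else st.1 ++ [st.2]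
  PySem.Str.join " " (words.map String.ofList)

-- ===== PRECONDITION & SPEC =====
def Spec_remove_wrong_chars_from_text (text : String) (out : String) : Prop := out = remove_wrong_chars_from_text_alt text
instance (text : String) (out : String) : Decidable (Spec_remove_wrong_chars_from_text text out) := by unfold Spec_remove_wrong_chars_from_text; infer_instance

-- ===== CLAIM (what is proved, stated in full; the proofs are below) =====
def Claim_equal_remove_wrong_chars_from_text : Prop := ∀ (text : String), Dom_remove_wrong_chars_from_text text → Spec_remove_wrong_chars_from_text text (remove_wrong_chars_from_text text)

-- ===== LEMMAS AND PROOFS =====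

-- A's character substitution as a map
def pvAMap (c : Char) : Char :=
  let ch := c.toNat
  if ((65 ≤ ch && ch ≤ 90) || (97 ≤ ch && ch ≤ 122) || (ch == 32) || (ch == 39) || (ch == 46)) then c else ' '

-- B's fold step, named
def pvBStep (p : List (List Char) × List Char) (c : Char) : List (List Char) × List Char :=
  if pvBKeep c then (p.1, p.2 ++ [c]) else if p.2.isEmpty then p else (p.1 ++ [p.2], [])

lemma pvCharLe_iff (a c : Char) : a ≤ c ↔ a.toNat ≤ c.toNat := by
  rw [Char.le_def, UInt32.le_iff_toNat_le]; constructor <;> intro h <;> exact h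

lemma pvCharEq_iff (c a : Char) : c = a ↔ c.toNat = a.toNat :=
  ⟨fun h => h ▸ rfl, fun h => Char.ext (UInt32.toNat_inj.mp h)⟩

lemma pvBKeep_iff (c : Char) : pvBKeep c = true ↔
    ((65 ≤ c.toNat ∧ c.toNat ≤ 90) ∨ (97 ≤ c.toNat ∧ c.toNat ≤ 122) ∨ c.toNat = 46 ∨ c.toNat = 39) := by
  have hA : ('A' : Char).toNat = 65 := rfl
  have hZ : ('Z' : Char).toNat = 90 := rfl
  have ha : ('a' : Char).toNat = 97 := rfl
  have hz : ('z' : Char).toNat = 122 := rfl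
  have hd : ('.' : Char).toNat = 46 := rfl
  have hq : ('\'' : Char).toNat = 39 := rfl
  simp only [pvBKeep, PySem.Chars.isalpha, PySem.Chars.isupper, PySem.Chars.islower,
    Bool.or_eq_true, Bool.and_eq_true, decide_eq_true_eq, beq_iff_eq,
    pvCharLe_iff, pvCharEq_iff, hA, hZ, ha, hz, hd, hq]
  tauto

lemma pvChar_facts (c : Char) :
    (pvBKeep c = true ∧ pvAMap c = c ∧ PySem.Chars.isspace c = false) ∨
    (pvBKeep c = false ∧ pvAMap c = ' ') := by
  by_cases h : pvBKeep c = true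
  · left
    have hn := (pvBKeep_iff c).mp h
    refine ⟨h, ?_, ?_⟩
    · simp only [pvAMap]
      split_ifs with hh
      · rfl
      · exfalso; apply hh
        simp only [Bool.or_eq_true, Bool.and_eq_true, decide_eq_true_eq, beq_iff_eq]
        omega
    · simp only [PySem.Chars.isspace]
      simp only [Bool.or_eq_false_iff, Bool.and_eq_false_iff, decide_eq_false_iff_not, not_le]
      omega
  · right
    have hn : ¬ ((65 ≤ c.toNat ∧ c.toNat ≤ 90) ∨ (97 ≤ c.toNat ∧ c.toNat ≤ 122) ∨ c.toNat = 46 ∨ c.toNat = 39) :=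
      fun hx => h ((pvBKeep_iff c).mpr hx)
    refine ⟨by simpa using h, ?_⟩
    simp only [pvAMap]
    split_ifs with hh
    · simp only [Bool.or_eq_true, Bool.and_eq_true, decide_eq_true_eq, beq_iff_eq] at hh
      have : c.toNat = 32 := by omega
      exact ((pvCharEq_iff c ' ').mpr this)
    · rfl

lemma pvBKeep_space : pvBKeep ' ' = false := by decide
lemma pvIsspace_space : PySem.Chars.isspace ' ' = true := by decide

-- the collapse phase: split₀.go on a string whose chars are all kept-non-space or ' '
-- equals B's word-accumulating fold
lemma pvGo_eq (m : List Char)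
    (hm : ∀ c ∈ m, (pvBKeep c = true ∧ PySem.Chars.isspace c = false) ∨ c = ' ')
    (cur : List Char) (acc : List (List Char)) :
    PySem.Chars.split₀.go m cur acc =
      (let st := m.foldl pvBStep (acc.reverse, cur.reverse)
       if st.2.isEmpty then st.1 else st.1 ++ [st.2]) := by
  induction m generalizing cur acc with
  | nil =>
    simp only [PySem.Chars.split₀.go, List.foldl_nil]
    by_cases hcur : cur = []
    · subst hcur; simp
    · simp [List.isEmpty_iff, hcur]
  | cons c rest ih =>
    have hrest : ∀ x ∈ rest, (pvBKeep x = true ∧ PySem.Chars.isspace x = false) ∨ x = ' ' :=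
      fun x hx => hm x (List.mem_cons_of_mem _ hx)
    rcases hm c (by simp) with ⟨hk, hs⟩ | rfl
    · rw [show PySem.Chars.split₀.go (c :: rest) cur acc = PySem.Chars.split₀.go rest (c :: cur) acc from by
        simp [PySem.Chars.split₀.go, hs]]
      rw [ih hrest]
      simp only [List.foldl_cons]
      have : pvBStep (acc.reverse, cur.reverse) c = (acc.reverse, (c :: cur).reverse) := by
        simp [pvBStep, hk]
      rw [this]
    · by_cases hcur : cur = []
      · subst hcur
        rw [show PySem.Chars.split₀.go (' ' :: rest) [] acc = PySem.Chars.split₀.go rest [] acc from by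
          simp [PySem.Chars.split₀.go, pvIsspace_space]]
        rw [ih hrest]
        simp only [List.foldl_cons]
        have : pvBStep (acc.reverse, List.reverse []) ' ' = (acc.reverse, List.reverse []) := by
          simp [pvBStep, pvBKeep_space]
        rw [this]
      · rw [show PySem.Chars.split₀.go (' ' :: rest) cur acc
              = PySem.Chars.split₀.go rest [] (cur.reverse :: acc) from by
          simp [PySem.Chars.split₀.go, pvIsspace_space, List.isEmpty_iff, hcur]]
        rw [ih hrest]
        simp only [List.foldl_cons]
        have : pvBStep (acc.reverse, cur.reverse) ' ' = ((cur.reverse :: acc).reverse, List.reverse []) := by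
          simp [pvBStep, pvBKeep_space, List.isEmpty_iff, hcur]
        rw [this]

lemma pvStep_map (p : List (List Char) × List Char) (c : Char) :
    pvBStep p (pvAMap c) = pvBStep p c := by
  rcases pvChar_facts c with ⟨hk, hmap, _⟩ | ⟨hk, hmap⟩
  · rw [hmap]
  · rw [hmap]; simp [pvBStep, pvBKeep_space, hk]

-- ===== VERDICT (by name: the statement is the Claim_ definition above) =====
theorem remove_wrong_chars_from_text_spec : Claim_equal_remove_wrong_chars_from_text := by
  intro text _
  unfold Spec_remove_wrong_chars_from_text remove_wrong_chars_from_text remove_wrong_chars_from_text_alt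
  set cs := text.toList with hcs
  simp only []
  -- A's index loop is a fold over the characters
  rw [PySem.List.foldl_pyRange_zero_pyGetD cs ' '
      (fun (acc : List Char) (c : Char) =>
        if ((65 ≤ c.toNat && c.toNat ≤ 90) || (97 ≤ c.toNat && c.toNat ≤ 122) ||
            (c.toNat == 32) || (c.toNat == 39) || (c.toNat == 46)) then acc ++ [c] else acc ++ [' '])
      ([] : List Char)]
  have hmap : cs.foldl
      (fun (acc : List Char) (c : Char) =>
        if ((65 ≤ c.toNat && c.toNat ≤ 90) || (97 ≤ c.toNat && c.toNat ≤ 122) ||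
            (c.toNat == 32) || (c.toNat == 39) || (c.toNat == 46)) then acc ++ [c] else acc ++ [' '])
      ([] : List Char) = cs.map pvAMap := by
    have := PySem.List.foldl_append_singleton_eq_map pvAMap cs []
    rw [List.nil_append] at this
    rw [← this]
    apply PySem.List.foldl_congr_mem
    intro acc c _
    simp only [pvAMap]
    split_ifs <;> rfl
  rw [hmap]
  -- both sides to Chars
  simp only [PySem.Str.join, PySem.Str.split₀]
  have hm : ∀ c ∈ cs.map pvAMap, (pvBKeep c = true ∧ PySem.Chars.isspace c = false) ∨ c = ' ' := by
    intro c hc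
    rcases List.mem_map.mp hc with ⟨x, _, rfl⟩
    rcases pvChar_facts x with ⟨hk, hmapx, hs⟩ | ⟨_, hmapx⟩
    · left; rw [hmapx]; exact ⟨hk, hs⟩
    · right; rw [hmapx]
  have hsplit : PySem.Chars.split₀ (String.ofList (cs.map pvAMap)).toList =
      (let st := (cs.map pvAMap).foldl pvBStep ([], [])
       if st.2.isEmpty then st.1 else st.1 ++ [st.2]) := by
    rw [String.toList_ofList]
    exact pvGo_eq (cs.map pvAMap) hm [] []
  rw [hsplit]
  -- B's fold over cs equals the fold over the mapped list
  have hfold : (cs.map pvAMap).foldl pvBStep (([] : List (List Char)), ([] : List Char)) =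
      cs.foldl
        (fun (p : List (List Char) × List Char) c =>
          if pvBKeep c then (p.1, p.2 ++ [c]) else if p.2.isEmpty then p else (p.1 ++ [p.2], []))
        ([], []) := by
    rw [List.foldl_map]
    apply PySem.List.foldl_congr_mem
    intro p c _
    rw [pvStep_map]
    rfl
  rw [hfold]
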